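-- pv_equiv track=rewrite | github.com/Jaano/npmp-cli | src/npmp_cli/cli_common.py | split_repeatable_csv
-- ===== SOURCE A (Python) =====
-- def split_repeatable_csv(values: list[str] | None) -> list[str]:
--     if not values:
--         return []
--     out: list[str] = []
--     for raw in values:
--         s = str(raw or "").strip()
--         if not s:
--             continue
--         if "," in s:
--             out.extend([p.strip() for p in s.split(",") if p.strip()])
--         else:
--             out.append(s)
--     return out
-- ===== SOURCE B (Python) =====
-- def split_repeatable_csv(values: list[str] | None) -> list[str]:
--     if not values:
--         return []
--     joined = ",".join(str(raw or "").strip() for raw in values)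
--     return [p for p in (piece.strip() for piece in joined.split(",")) if p]
-- ===== Notes on version B (the rewrite author's own statement) =====
-- stated objective: simpler
-- what changed: Replaces A's per-element loop that branches on whether the stripped element contains a comma and extends/appends accordingly by a join-then-split-once decomposition: all stripped elements are joined with commas into one string which is split once, stripped and filtered in a single comprehension.
import Mathlib
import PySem

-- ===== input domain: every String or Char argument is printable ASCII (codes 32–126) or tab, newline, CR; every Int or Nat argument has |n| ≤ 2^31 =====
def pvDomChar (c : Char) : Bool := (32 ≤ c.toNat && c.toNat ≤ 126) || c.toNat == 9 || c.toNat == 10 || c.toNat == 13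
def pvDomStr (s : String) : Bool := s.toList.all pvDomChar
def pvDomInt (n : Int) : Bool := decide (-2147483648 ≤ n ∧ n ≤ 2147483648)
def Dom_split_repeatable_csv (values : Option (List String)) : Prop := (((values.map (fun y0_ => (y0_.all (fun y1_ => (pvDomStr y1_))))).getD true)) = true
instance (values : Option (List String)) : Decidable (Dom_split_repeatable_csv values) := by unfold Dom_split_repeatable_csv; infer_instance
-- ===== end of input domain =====

-- B replaces A's per-element branch-on-comma split-and-extend loop by joining all
-- stripped elements with commas and splitting the combined string once (objective:
-- simpler decomposition; same return value).

-- ===== PORT A =====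
-- `str(raw or "").strip()` on a str argument is `raw.strip()` (`raw or ""` is `raw`
-- unless raw == "", and "".strip() == ""), ported as PySem.Str.strip raw.
-- `s.split(",")` has the literal non-empty separator ",", so PySem.Str.split? is
-- always `some _`; `.getD []` only discharges the impossible `none`.
def split_repeatable_csv (values : Option (List String)) : List String :=
  match values with
  | none => []                                      -- `if not values` (None)
  | some vs =>
    if vs = [] then []                              -- `if not values` (empty list)
    else
      vs.foldl (fun out raw =>
        let s := PySem.Str.strip raw
        if s = "" then out
        else if PySem.Str.isIn "," s then
          out ++ (((PySem.Str.split? s ",").getD []).filter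
                    (fun p => !(PySem.Str.strip p == ""))).map (fun p => PySem.Str.strip p)
        else out ++ [s]) []

-- ===== PORT B =====
def split_repeatable_csv_alt (values : Option (List String)) : List String :=
  match values with
  | none => []                                      -- `if not values` (None)
  | some vs =>
    if vs = [] then []                              -- `if not values` (empty list)
    else
      let joined := PySem.Str.join "," (vs.map (fun raw => PySem.Str.strip raw))
      ((((PySem.Str.split? joined ",").getD []).map (fun piece => PySem.Str.strip piece)).filter
        (fun p => !(p == "")))

-- ===== PRECONDITION & SPEC =====
def Spec_split_repeatable_csv (values : Option (List String)) (out : List String) : Prop := out = split_repeatable_csv_alt values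
instance (values : Option (List String)) (out : List String) : Decidable (Spec_split_repeatable_csv values out) := by unfold Spec_split_repeatable_csv; infer_instance

-- ===== CLAIM (what is proved, stated in full; the proofs are below) =====
def Claim_equal_split_repeatable_csv : Prop := ∀ (values : Option (List String)), Dom_split_repeatable_csv values → Spec_split_repeatable_csv values (split_repeatable_csv values)

-- ===== LEMMAS AND PROOFS =====

-- the per-element contribution both programs produce from a (pre-strip) element list `cs`
def pvPieces (cs : List Char) : List String :=
  ((cs.splitOnP (· == ',')).map (fun q => String.ofList (PySem.Chars.strip q))).filter
    (fun p => !(p == ""))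

-- PySem's fuel-based splitter with the single-char separator "," is List.splitOnP
theorem pvGo_spec (fuel : Nat) (l cur : List Char) (acc : List (List Char))
    (hf : l.length < fuel) (hc : (',' : Char) ∉ cur) :
    PySem.Chars.splitOn.go [','] fuel l cur acc
      = acc.reverse ++ ((cur.reverse ++ l).splitOnP (· == ',')) := by
  induction fuel generalizing l cur acc with
  | zero => omega
  | succ fuel ih =>
    cases l with
    | nil =>
      simp only [PySem.Chars.splitOn.go, List.reverse_cons, List.append_nil]
      rw [List.splitOnP_eq_single]
      intro x hx
      simp only [List.mem_reverse] at hx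
      simp only [Bool.not_eq_true, beq_eq_false_iff_ne]
      exact fun h => hc (h ▸ hx)
    | cons ch rest =>
      simp only [PySem.Chars.splitOn.go]
      by_cases h : ch = ','
      · subst h
        have hpre : [','].isPrefixOf (',' :: rest) = true := by simp [List.isPrefixOf]
        rw [if_pos hpre]
        have : List.drop [','].length (',' :: rest) = rest := by simp
        rw [this, ih rest [] (cur.reverse :: acc) (by simpa using hf) (by simp)]
        rw [List.splitOnP_first (p := fun x => x == ',') (xs := cur.reverse) (by
          intro x hx
          simp only [List.mem_reverse] at hx
          simp only [Bool.not_eq_true, beq_eq_false_iff_ne]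
          exact fun h => hc (h ▸ hx)) ',' (by simp) rest]
        simp
      · have hpre : [','].isPrefixOf (ch :: rest) = false := by
          simp [List.isPrefixOf]
          exact fun hh => (h hh.symm).elim
        rw [if_neg (by simp [hpre])]
        rw [ih rest (ch :: cur) acc (by simpa using hf)
          (by simp only [List.mem_cons, not_or]; exact ⟨fun hh => h hh.symm, hc⟩)]
        simp

theorem pvSplitOn_comma (l : List Char) :
    PySem.Chars.splitOn l [','] = l.splitOnP (· == ',') := by
  unfold PySem.Chars.splitOn
  rw [pvGo_spec (l.length + 1) l [] [] (by omega) (by simp)]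
  simp

-- splitting a comma-join splits each part
theorem pvSplit_join (ps : List (List Char)) (p0 : List Char) :
    (PySem.Chars.join [','] (p0 :: ps)).splitOnP (· == ',')
      = (p0 :: ps).flatMap (fun q => q.splitOnP (· == ',')) := by
  induction ps generalizing p0 with
  | nil => simp [PySem.Chars.join_singleton]
  | cons p1 ps ih =>
    rw [PySem.Chars.join_cons_cons]
    have : p0 ++ [','] ++ PySem.Chars.join [','] (p1 :: ps)
        = p0 ++ ',' :: PySem.Chars.join [','] (p1 :: ps) := by simp
    rw [this, List.splitOnP_append_cons _ _ _ ',' (by simp), ih p1]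
    simp

theorem pvRstrip_idem (l : List Char) :
    PySem.Chars.rstrip (PySem.Chars.rstrip l) = PySem.Chars.rstrip l := by
  simp [PySem.Chars.rstrip, List.dropWhile_idempotent]

theorem pvLstrip_rstrip_lstrip (l : List Char) :
    PySem.Chars.lstrip (PySem.Chars.rstrip (PySem.Chars.lstrip l))
      = PySem.Chars.rstrip (PySem.Chars.lstrip l) := by
  simp only [PySem.Chars.lstrip, PySem.Chars.rstrip]
  cases h : List.dropWhile PySem.Chars.isspace l with
  | nil => simp
  | cons a t =>
    have hne : List.dropWhile PySem.Chars.isspace l ≠ [] := by rw [h]; simp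
    have h2 := List.head_dropWhile_not (p := PySem.Chars.isspace) (l := l) hne
    simp only [h] at h2
    have ha : PySem.Chars.isspace a = false := by simpa using h2
    rw [List.reverse_cons, List.dropWhile_append]
    by_cases he : (List.dropWhile PySem.Chars.isspace t.reverse).isEmpty
    · simp [he, ha]
    · simp only [he, Bool.false_eq_true, if_neg, not_false_iff]
      rw [List.reverse_append]
      simp [ha]

theorem pvStrip_idem (l : List Char) :
    PySem.Chars.strip (PySem.Chars.strip l) = PySem.Chars.strip l := by
  simp only [PySem.Chars.strip]
  rw [pvLstrip_rstrip_lstrip, pvRstrip_idem]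

theorem pvStrip_ofList (cs : List Char) :
    PySem.Str.strip (String.ofList cs) = String.ofList (PySem.Chars.strip cs) := by
  simp [PySem.Str.strip, String.toList_ofList]

theorem pvSplit?_eq (s : String) :
    PySem.Str.split? s "," = some ((s.toList.splitOnP (· == ',')).map String.ofList) := by
  have h : ("," : String).toList = [','] := by decide
  simp [PySem.Str.split?, PySem.Chars.split?, h, pvSplitOn_comma]

-- A's loop body contributes pvPieces of the stripped element
theorem pvElem (raw : String) :
    (let s := PySem.Str.strip raw
     if s = "" then []
     else if PySem.Str.isIn "," s then
       (((PySem.Str.split? s ",").getD []).filter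
         (fun p => !(PySem.Str.strip p == ""))).map (fun p => PySem.Str.strip p)
     else [s])
      = pvPieces (PySem.Chars.strip raw.toList) := by
  have hsl : (PySem.Str.strip raw).toList = PySem.Chars.strip raw.toList :=
    PySem.Str.toList_strip raw
  by_cases hs : PySem.Str.strip raw = ""
  · have h0 : PySem.Chars.strip raw.toList = [] := by
      rw [← hsl, hs]; rfl
    simp only [hs, h0, pvPieces, List.splitOnP_nil, if_pos]
    decide
  · simp only [if_neg hs]
    by_cases hin : PySem.Str.isIn "," (PySem.Str.strip raw) = true
    · rw [if_pos hin, pvSplit?_eq, hsl]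
      simp only [Option.getD_some, pvPieces, List.filter_map, List.map_map]
      have hpred : ((fun p => !(PySem.Str.strip p == "")) ∘ String.ofList)
          = ((fun p => !(p == "")) ∘ fun q => String.ofList (PySem.Chars.strip q)) := by
        funext q
        simp [Function.comp, pvStrip_ofList]
      have hfn : ((fun p => PySem.Str.strip p) ∘ String.ofList)
          = fun q => String.ofList (PySem.Chars.strip q) := by
        funext q
        simp [Function.comp, pvStrip_ofList]
      rw [hpred, hfn]
    · simp only [hin, Bool.false_eq_true, if_neg, not_false_iff]
      have hni : (',' : Char) ∉ PySem.Chars.strip raw.toList := by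
        intro hmem
        apply hin
        rw [PySem.Str.isIn_eq]
        have h : ("," : String).toList = [','] := by decide
        rw [h, hsl, (PySem.Chars.isIn_iff_infix _ _).mpr ((List.singleton_infix_iff ',' _).mpr hmem)]
      rw [pvPieces, List.splitOnP_eq_single _ _ (by
        intro x hx
        simp only [Bool.not_eq_true, beq_eq_false_iff_ne]
        exact fun h => hni (h ▸ hx))]
      simp only [List.map_cons, List.map_nil, pvStrip_idem]
      rw [← hsl, String.ofList_toList]
      simp [hs]

-- B on a non-empty list is the concatenation of the per-element pieces
theorem pvBside (v : String) (vt : List String) :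
    ((((PySem.Str.split? (PySem.Str.join ","
          ((v :: vt).map (fun raw => PySem.Str.strip raw))) ",").getD []).map
        (fun piece => PySem.Str.strip piece)).filter (fun p => !(p == "")))
      = (v :: vt).flatMap (fun raw => pvPieces (PySem.Chars.strip raw.toList)) := by
  rw [pvSplit?_eq]
  have hcomma : (",":String).toList = [','] := by decide
  have hj : (PySem.Str.join "," ((v :: vt).map (fun raw => PySem.Str.strip raw))).toList
      = PySem.Chars.join [',']
          ((v :: vt).map (fun raw => PySem.Chars.strip raw.toList)) := by
    rw [PySem.Str.toList_join, hcomma, List.map_map]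
    congr 1
    exact List.map_congr_left (fun raw _ => PySem.Str.toList_strip raw)
  rw [hj]
  have hmapcons : (v :: vt).map (fun raw => PySem.Chars.strip raw.toList)
      = PySem.Chars.strip v.toList :: vt.map (fun raw => PySem.Chars.strip raw.toList) := rfl
  rw [hmapcons, pvSplit_join, ← hmapcons, List.map_flatMap, Option.getD_some,
    List.map_flatMap, List.filter_flatMap, List.flatMap_map]
  congr 1
  funext raw
  simp only [pvPieces, List.map_map]
  congr 1
  congr 1
  funext q
  simp [Function.comp, pvStrip_ofList]

theorem pvMain (values : Option (List String)) :
    split_repeatable_csv values = split_repeatable_csv_alt values := by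
  cases values with
  | none => rfl
  | some vs =>
    cases vs with
    | nil => rfl
    | cons v vt =>
      simp only [split_repeatable_csv, split_repeatable_csv_alt,
        if_neg (List.cons_ne_nil v vt)]
      have hbody : (fun (out : List String) raw =>
          let s := PySem.Str.strip raw
          if s = "" then out
          else if PySem.Str.isIn "," s then
            out ++ (((PySem.Str.split? s ",").getD []).filter
                      (fun p => !(PySem.Str.strip p == ""))).map (fun p => PySem.Str.strip p)
          else out ++ [s])
          = fun (out : List String) raw => out ++
            (let s := PySem.Str.strip raw
             if s = "" then []
             else if PySem.Str.isIn "," s then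
               (((PySem.Str.split? s ",").getD []).filter
                 (fun p => !(PySem.Str.strip p == ""))).map (fun p => PySem.Str.strip p)
             else [s]) := by
        funext out raw
        dsimp only
        split_ifs <;> simp
      rw [hbody, PySem.List.foldl_append_eq_flatMap, List.nil_append]
      have helem : (fun raw =>
          (let s := PySem.Str.strip raw
           if s = "" then []
           else if PySem.Str.isIn "," s then
             (((PySem.Str.split? s ",").getD []).filter
               (fun p => !(PySem.Str.strip p == ""))).map (fun p => PySem.Str.strip p)
           else [s]))
          = fun raw => pvPieces (PySem.Chars.strip raw.toList) := by
        funext raw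
        exact pvElem raw
      rw [helem, ← pvBside v vt]

-- ===== VERDICT (by name: the statement is the Claim_ definition above) =====
theorem split_repeatable_csv_spec : Claim_equal_split_repeatable_csv := by
  intro values _
  unfold Spec_split_repeatable_csv
  exact pvMain values
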